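-- pv_equiv track=rewrite | github.com/lukaslueg/wirepy | wirepy/lib/dumpcap.py | _create_dumpcap_args
-- ===== SOURCE A (Python) =====
-- DUMPCAP_BIN = ('dumpcap', )
--
-- def _create_dumpcap_args(command, child_mode=True, interfaces=None,
--                          capture_filter=None, snaplen=None, promiscuous=True,
--                          monitor_mode=False, kernel_buffer_size=None,
--                          link_layer_type=None, wifi_channel=None,
--                          max_packet_count=None, autostop_duration=None,
--                          autostop_filesize=None, autostop_files=None,
--                          savefile=None, group_access=False,
--                          ringbuffer_duration=None, ringbuffer_filesize=None,
--                          ringbuffer_files=None, use_pcapng=False,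
--                          use_libpcap=False, max_buffered_packets=None,
--                          max_buffered_bytes=None, separate_threads=False):
--     args = list(DUMPCAP_BIN)
--     #TODO correct argument ordering for -f, -y and such with respect to -i
--     if command == 'capture':
--         pass  # capturing is the default
--     elif command == 'list_devices':
--         args.append('-D')
--     elif command == 'list_layers':
--         args.append('-L')
--     elif command == 'stats':
--         args.append('-S')
--     else:
--         raise ValueError('Unknown command "%s"' % (command, ))
--     if child_mode:
--         # TODO Use the named pipe on windows
--         args += ['-Z', 'none']
--     if interfaces is not None:
--         for iface in interfaces:
--             args += ['-i', str(iface)]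
--     if capture_filter:
--         args += ['-f', str(capture_filter)]
--     if snaplen:
--         args += ['-s', str(int(snaplen))]
--     if not promiscuous:
--         args.append('-p')
--     if monitor_mode:
--         args.append('-I')
--     if kernel_buffer_size is not None:
--         args += ['-B', str(int(kernel_buffer_size))]
--     if link_layer_type is not None:
--         args += ['-y', str(link_layer_type)]
--     if wifi_channel is not None:
--         args += ['-k', str(wifi_channel)]
--     if max_packet_count is not None:
--         args += ['-c', str(int(max_packet_count))]
--     if autostop_duration is not None:
--         args += ['-a', 'duration:%i' % (autostop_duration, )]
--     if autostop_filesize is not None: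
--         args += ['-a', 'filesize:%i' % (autostop_filesize, )]
--     if savefile is not None:
--         args += ['-w', str(savefile)]
--     if group_access:
--         args.append('-g')
--     if ringbuffer_duration is not None:
--         args += ['-b', 'duration:%i' % (ringbuffer_duration, )]
--     if ringbuffer_filesize is not None:
--         args += ['-b', 'filesize:%i' % (ringbuffer_filesize, )]
--     if ringbuffer_files is not None:
--         args += ['-b', 'files:%i' % (ringbuffer_files, )]
--     if use_pcapng:
--         args.append('-n')
--     if use_libpcap:
--         args.append('-P')
--     if max_buffered_packets is not None:
--         args += ['-N', str(int(max_buffered_packets))]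
--     if max_buffered_bytes is not None:
--         args += ['-C', str(int(max_buffered_bytes))]
--     if separate_threads:
--         args.append('-t')
--     return args
-- ===== SOURCE B (Python) =====
-- # Table-driven rewrite: command dispatch via a dict, then one loop over a
-- # declarative option table (predicate kind, flag, value prefix) instead of
-- # twenty hand-written if-blocks.
--
-- DUMPCAP_BIN = ('dumpcap', )
--
--
-- def _create_dumpcap_args(command, child_mode=True, interfaces=None,
--                          capture_filter=None, snaplen=None, promiscuous=True,
--                          monitor_mode=False, kernel_buffer_size=None,
--                          link_layer_type=None, wifi_channel=None,
--                          max_packet_count=None, autostop_duration=None,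
--                          autostop_filesize=None, autostop_files=None,
--                          savefile=None, group_access=False,
--                          ringbuffer_duration=None, ringbuffer_filesize=None,
--                          ringbuffer_files=None, use_pcapng=False,
--                          use_libpcap=False, max_buffered_packets=None,
--                          max_buffered_bytes=None, separate_threads=False):
--     cmd_flags = {'capture': [], 'list_devices': ['-D'],
--                  'list_layers': ['-L'], 'stats': ['-S']}
--     if command not in cmd_flags:
--         raise ValueError('Unknown command "%s"' % (command, ))
--     args = list(DUMPCAP_BIN) + cmd_flags[command]
--     if child_mode:
--         args += ['-Z', 'none']
--     for iface in (interfaces if interfaces is not None else []):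
--         args += ['-i', str(iface)]
--     table = [
--         ('truthy', capture_filter, '-f', ''),
--         ('truthy', snaplen, '-s', ''),
--         ('flag', not promiscuous, '-p', ''),
--         ('flag', monitor_mode, '-I', ''),
--         ('present', kernel_buffer_size, '-B', ''),
--         ('present', link_layer_type, '-y', ''),
--         ('present', wifi_channel, '-k', ''),
--         ('present', max_packet_count, '-c', ''),
--         ('present', autostop_duration, '-a', 'duration:'),
--         ('present', autostop_filesize, '-a', 'filesize:'),
--         ('present', savefile, '-w', ''),
--         ('flag', group_access, '-g', ''),
--         ('present', ringbuffer_duration, '-b', 'duration:'),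
--         ('present', ringbuffer_filesize, '-b', 'filesize:'),
--         ('present', ringbuffer_files, '-b', 'files:'),
--         ('flag', use_pcapng, '-n', ''),
--         ('flag', use_libpcap, '-P', ''),
--         ('present', max_buffered_packets, '-N', ''),
--         ('present', max_buffered_bytes, '-C', ''),
--         ('flag', separate_threads, '-t', ''),
--     ]
--     for kind, value, flag, prefix in table:
--         if kind == 'flag':
--             if value:
--                 args.append(flag)
--         elif (value is not None) if kind == 'present' else bool(value):
--             args += [flag, prefix + str(value)]
--     return args
-- ===== Notes on version B (the rewrite author's own statement) =====
-- stated objective: idiomatic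
-- what changed: Replaces the command if/elif chain with a dict dispatch and collapses the twenty hand-written per-option if-blocks into a single loop over a declarative option table (predicate kind, flag, value prefix).
import Mathlib
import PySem

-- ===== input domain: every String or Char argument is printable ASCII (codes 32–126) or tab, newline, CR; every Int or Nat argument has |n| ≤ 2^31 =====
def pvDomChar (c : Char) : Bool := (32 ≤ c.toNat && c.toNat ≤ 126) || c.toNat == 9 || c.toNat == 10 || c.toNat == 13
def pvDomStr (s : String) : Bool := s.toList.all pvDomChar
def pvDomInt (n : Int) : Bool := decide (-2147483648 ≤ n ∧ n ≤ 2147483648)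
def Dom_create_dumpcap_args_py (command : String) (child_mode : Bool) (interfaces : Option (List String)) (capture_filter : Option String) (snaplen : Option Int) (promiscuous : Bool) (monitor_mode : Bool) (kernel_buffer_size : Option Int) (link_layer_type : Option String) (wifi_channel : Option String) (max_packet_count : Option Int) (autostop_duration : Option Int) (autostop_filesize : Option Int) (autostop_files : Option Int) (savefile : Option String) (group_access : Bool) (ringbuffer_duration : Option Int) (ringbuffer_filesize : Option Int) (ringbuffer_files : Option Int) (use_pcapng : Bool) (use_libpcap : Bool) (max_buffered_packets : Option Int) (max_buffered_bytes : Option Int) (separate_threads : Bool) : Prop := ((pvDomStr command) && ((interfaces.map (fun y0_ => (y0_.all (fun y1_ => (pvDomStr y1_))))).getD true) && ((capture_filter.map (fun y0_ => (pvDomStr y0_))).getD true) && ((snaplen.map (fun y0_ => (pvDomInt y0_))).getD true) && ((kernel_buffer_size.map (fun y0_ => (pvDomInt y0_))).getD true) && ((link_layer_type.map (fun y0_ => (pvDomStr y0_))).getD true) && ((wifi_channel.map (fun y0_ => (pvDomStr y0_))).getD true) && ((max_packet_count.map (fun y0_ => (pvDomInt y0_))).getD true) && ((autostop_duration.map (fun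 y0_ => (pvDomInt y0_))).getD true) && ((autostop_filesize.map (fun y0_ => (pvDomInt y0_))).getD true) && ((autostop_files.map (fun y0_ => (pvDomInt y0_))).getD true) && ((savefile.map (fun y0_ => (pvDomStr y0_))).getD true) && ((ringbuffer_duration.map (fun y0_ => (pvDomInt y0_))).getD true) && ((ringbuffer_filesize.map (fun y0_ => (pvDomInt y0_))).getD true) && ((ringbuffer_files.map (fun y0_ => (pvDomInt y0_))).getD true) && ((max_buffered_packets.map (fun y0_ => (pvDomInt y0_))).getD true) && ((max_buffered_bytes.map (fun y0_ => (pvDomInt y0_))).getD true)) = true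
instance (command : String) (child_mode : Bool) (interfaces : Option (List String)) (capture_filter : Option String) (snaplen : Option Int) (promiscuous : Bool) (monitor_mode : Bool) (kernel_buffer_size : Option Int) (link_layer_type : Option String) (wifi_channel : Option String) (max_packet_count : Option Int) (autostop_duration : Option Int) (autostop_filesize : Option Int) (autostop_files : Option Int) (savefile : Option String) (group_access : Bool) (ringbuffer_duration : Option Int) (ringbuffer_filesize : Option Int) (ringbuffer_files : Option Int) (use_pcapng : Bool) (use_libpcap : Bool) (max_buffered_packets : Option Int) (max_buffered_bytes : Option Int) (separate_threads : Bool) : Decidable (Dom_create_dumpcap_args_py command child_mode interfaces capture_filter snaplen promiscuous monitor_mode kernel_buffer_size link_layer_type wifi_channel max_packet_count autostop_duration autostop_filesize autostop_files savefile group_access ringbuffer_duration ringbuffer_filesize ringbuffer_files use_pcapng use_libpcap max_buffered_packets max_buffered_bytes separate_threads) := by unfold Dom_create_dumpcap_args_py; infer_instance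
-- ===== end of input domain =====

-- B rewrites A's twenty hand-written option if-blocks as one loop over a declarative
-- option table (same outputs; objective: idiomatic/alternative structure, no speed claim).

-- ===== PORT A =====
-- shared leaf helpers (Python str()/truthiness on optional values)
def pyOptStrVal : Option String → String
  | some s => s
  | none => "None"

def pyOptIntVal : Option Int → String
  | some n => PySem.Int.toStr n
  | none => "None"

def truthyOptStr : Option String → Bool
  | some s => s ≠ ""
  | none => false

def truthyOptInt : Option Int → Bool
  | some n => n ≠ 0
  | none => false

def create_dumpcap_args_py (command : String) (child_mode : Bool) (interfaces : Option (List String)) (capture_filter : Option String) (snaplen : Option Int) (promiscuous : Bool) (monitor_mode : Bool) (kernel_buffer_size : Option Int) (link_layer_type : Option String) (wifi_channel : Option String) (max_packet_count : Option Int) (autostop_duration : Option Int) (autostop_filesize : Option Int) (autostop_files : Option Int) (savefile : Option String) (group_access : Bool) (ringbuffer_duration : Option Int) (ringbuffer_filesize : Option Int) (ringbuffer_files : Option Int) (use_pcapng : Bool) (use_libpcap : Bool) (max_buffered_packets : Option Int) (max_buffered_bytes : Option Int) (separate_threads : Bool) : List String :=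
  let args : List String := ["dumpcap"]
  let args := if command = "capture" then args
    else if command = "list_devices" then args ++ ["-D"]
    else if command = "list_layers" then args ++ ["-L"]
    else if command = "stats" then args ++ ["-S"]
    else []   -- Python raises ValueError here; excluded by Pre_
  let args := if child_mode then args ++ ["-Z", "none"] else args
  let args := match interfaces with
    | some ifs => ifs.foldl (fun a iface => a ++ ["-i", iface]) args
    | none => args
  let args := if truthyOptStr capture_filter then args ++ ["-f", pyOptStrVal capture_filter] else args
  let args := if truthyOptInt snaplen then args ++ ["-s", pyOptIntVal snaplen] else args
  let args := if !promiscuous then args ++ ["-p"] else args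
  let args := if monitor_mode then args ++ ["-I"] else args
  let args := if kernel_buffer_size.isSome then args ++ ["-B", pyOptIntVal kernel_buffer_size] else args
  let args := if link_layer_type.isSome then args ++ ["-y", pyOptStrVal link_layer_type] else args
  let args := if wifi_channel.isSome then args ++ ["-k", pyOptStrVal wifi_channel] else args
  let args := if max_packet_count.isSome then args ++ ["-c", pyOptIntVal max_packet_count] else args
  let args := if autostop_duration.isSome then args ++ ["-a", "duration:" ++ pyOptIntVal autostop_duration] else args
  let args := if autostop_filesize.isSome then args ++ ["-a", "filesize:" ++ pyOptIntVal autostop_filesize] else args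
  let args := if savefile.isSome then args ++ ["-w", pyOptStrVal savefile] else args
  let args := if group_access then args ++ ["-g"] else args
  let args := if ringbuffer_duration.isSome then args ++ ["-b", "duration:" ++ pyOptIntVal ringbuffer_duration] else args
  let args := if ringbuffer_filesize.isSome then args ++ ["-b", "filesize:" ++ pyOptIntVal ringbuffer_filesize] else args
  let args := if ringbuffer_files.isSome then args ++ ["-b", "files:" ++ pyOptIntVal ringbuffer_files] else args
  let args := if use_pcapng then args ++ ["-n"] else args
  let args := if use_libpcap then args ++ ["-P"] else args
  let args := if max_buffered_packets.isSome then args ++ ["-N", pyOptIntVal max_buffered_packets] else args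
  let args := if max_buffered_bytes.isSome then args ++ ["-C", pyOptIntVal max_buffered_bytes] else args
  if separate_threads then args ++ ["-t"] else args

-- ===== PORT B =====
-- a table entry's predicate kind and (heterogeneous) value, as in Source B's tuples
inductive DcKind | flag | truthy | present
deriving DecidableEq, Repr

inductive DcVal
  | b : Bool → DcVal
  | s : Option String → DcVal
  | i : Option Int → DcVal
deriving DecidableEq, Repr

def dcTruthy : DcVal → Bool
  | .b x => x
  | .s v => truthyOptStr v
  | .i v => truthyOptInt v

def dcPresent : DcVal → Bool
  | .b _ => true
  | .s v => v.isSome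
  | .i v => v.isSome

def dcStr : DcVal → String
  | .b x => if x then "True" else "False"
  | .s v => pyOptStrVal v
  | .i v => pyOptIntVal v

-- body of Source B's `for kind, value, flag, prefix in table` loop
def dcStep (args : List String) (e : DcKind × DcVal × String × String) : List String :=
  match e with
  | (k, v, flag, pre) =>
    match k with
    | .flag => if dcTruthy v then args ++ [flag] else args
    | .present => if dcPresent v then args ++ [flag, pre ++ dcStr v] else args
    | .truthy => if dcTruthy v then args ++ [flag, pre ++ dcStr v] else args

def create_dumpcap_args_py_alt (command : String) (child_mode : Bool) (interfaces : Option (List String)) (capture_filter : Option String) (snaplen : Option Int) (promiscuous : Bool) (monitor_mode : Bool) (kernel_buffer_size : Option Int) (link_layer_type : Option String) (wifi_channel : Option String) (max_packet_count : Option Int) (autostop_duration : Option Int) (autostop_filesize : Option Int) (autostop_files : Option Int) (savefile : Option String) (group_access : Bool) (ringbuffer_duration : Option Int) (ringbuffer_filesize : Option Int) (ringbuffer_files : Option Int) (use_pcapng : Bool) (use_libpcap : Bool) (max_buffered_packets : Option Int) (max_buffered_bytes : Option Int) (separate_threads : Bool) : List String :=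
  let cmdFlags : PySem.Dict String (List String) :=
    ⟨[("capture", []), ("list_devices", ["-D"]), ("list_layers", ["-L"]), ("stats", ["-S"])]⟩
  match PySem.Dict.get? cmdFlags command with
  | none => []   -- Python raises ValueError here; excluded by Pre_
  | some fl =>
    let args := ["dumpcap"] ++ fl
    let args := if child_mode then args ++ ["-Z", "none"] else args
    let args := match interfaces with
      | some ifs => ifs.foldl (fun a iface => a ++ ["-i", iface]) args
      | none => args
    let table : List (DcKind × DcVal × String × String) :=
      [ (.truthy, .s capture_filter, "-f", ""),
        (.truthy, .i snaplen, "-s", ""),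
        (.flag, .b (!promiscuous), "-p", ""),
        (.flag, .b monitor_mode, "-I", ""),
        (.present, .i kernel_buffer_size, "-B", ""),
        (.present, .s link_layer_type, "-y", ""),
        (.present, .s wifi_channel, "-k", ""),
        (.present, .i max_packet_count, "-c", ""),
        (.present, .i autostop_duration, "-a", "duration:"),
        (.present, .i autostop_filesize, "-a", "filesize:"),
        (.present, .s savefile, "-w", ""),
        (.flag, .b group_access, "-g", ""),
        (.present, .i ringbuffer_duration, "-b", "duration:"),
        (.present, .i ringbuffer_filesize, "-b", "filesize:"),
        (.present, .i ringbuffer_files, "-b", "files:"),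
        (.flag, .b use_pcapng, "-n", ""),
        (.flag, .b use_libpcap, "-P", ""),
        (.present, .i max_buffered_packets, "-N", ""),
        (.present, .i max_buffered_bytes, "-C", ""),
        (.flag, .b separate_threads, "-t", "") ]
    table.foldl dcStep args

-- ===== PRECONDITION & SPEC =====
-- Pre_ excludes exactly the unknown-command inputs, on which Python A raises ValueError.
def Pre_create_dumpcap_args_py (command : String) (child_mode : Bool) (interfaces : Option (List String)) (capture_filter : Option String) (snaplen : Option Int) (promiscuous : Bool) (monitor_mode : Bool) (kernel_buffer_size : Option Int) (link_layer_type : Option String) (wifi_channel : Option String) (max_packet_count : Option Int) (autostop_duration : Option Int) (autostop_filesize : Option Int) (autostop_files : Option Int) (savefile : Option String) (group_access : Bool) (ringbuffer_duration : Option Int) (ringbuffer_filesize : Option Int) (ringbuffer_files : Option Int) (use_pcapng : Bool) (use_libpcap : Bool) (max_buffered_packets : Option Int) (max_buffered_bytes : Option Int) (separate_threads : Bool) : Prop :=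
  command = "capture" ∨ command = "list_devices" ∨ command = "list_layers" ∨ command = "stats"
instance (command : String) (child_mode : Bool) (interfaces : Option (List String)) (capture_filter : Option String) (snaplen : Option Int) (promiscuous : Bool) (monitor_mode : Bool) (kernel_buffer_size : Option Int) (link_layer_type : Option String) (wifi_channel : Option String) (max_packet_count : Option Int) (autostop_duration : Option Int) (autostop_filesize : Option Int) (autostop_files : Option Int) (savefile : Option String) (group_access : Bool) (ringbuffer_duration : Option Int) (ringbuffer_filesize : Option Int) (ringbuffer_files : Option Int) (use_pcapng : Bool) (use_libpcap : Bool) (max_buffered_packets : Option Int) (max_buffered_bytes : Option Int) (separate_threads : Bool) : Decidable (Pre_create_dumpcap_args_py command child_mode interfaces capture_filter snaplen promiscuous monitor_mode kernel_buffer_size link_layer_type wifi_channel max_packet_count autostop_duration autostop_filesize autostop_files savefile group_access ringbuffer_duration ringbuffer_filesize ringbuffer_files use_pcapng use_libpcap max_buffered_packets max_buffered_bytes separate_threads) := by unfold Pre_create_dumpcap_args_py; infer_instance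

def pvWitness_create_dumpcap_args_py : String × Bool × Option (List String) × Option String × Option Int × Bool × Bool × Option Int × Option String × Option String × Option Int × Option Int × Option Int × Option Int × Option String × Bool × Option Int × Option Int × Option Int × Bool × Bool × Option Int × Option Int × Bool :=
  ("capture", true, some ["eth0"], some "tcp", some 64, true, false, none, none, none, none, some 5, none, none, some "out.pcap", false, none, none, none, false, false, none, none, false)

def Spec_create_dumpcap_args_py (command : String) (child_mode : Bool) (interfaces : Option (List String)) (capture_filter : Option String) (snaplen : Option Int) (promiscuous : Bool) (monitor_mode : Bool) (kernel_buffer_size : Option Int) (link_layer_type : Option String) (wifi_channel : Option String) (max_packet_count : Option Int) (autostop_duration : Option Int) (autostop_filesize : Option Int) (autostop_files : Option Int) (savefile : Option String) (group_access : Bool) (ringbuffer_duration : Option Int) (ringbuffer_filesize : Option Int) (ringbuffer_files : Option Int) (use_pcapng : Bool) (use_libpcap : Bool) (max_buffered_packets : Option Int) (max_buffered_bytes : Option Int) (separate_threads : Bool) (out : List String) : Prop := out = create_dumpcap_args_py_alt command child_mode interfaces capture_filter snaplen promiscuous monitor_mode kernel_buffer_size link_layer_type wifi_channel max_packet_count autostop_duration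 autostop_filesize autostop_files savefile group_access ringbuffer_duration ringbuffer_filesize ringbuffer_files use_pcapng use_libpcap max_buffered_packets max_buffered_bytes separate_threads
instance (command : String) (child_mode : Bool) (interfaces : Option (List String)) (capture_filter : Option String) (snaplen : Option Int) (promiscuous : Bool) (monitor_mode : Bool) (kernel_buffer_size : Option Int) (link_layer_type : Option String) (wifi_channel : Option String) (max_packet_count : Option Int) (autostop_duration : Option Int) (autostop_filesize : Option Int) (autostop_files : Option Int) (savefile : Option String) (group_access : Bool) (ringbuffer_duration : Option Int) (ringbuffer_filesize : Option Int) (ringbuffer_files : Option Int) (use_pcapng : Bool) (use_libpcap : Bool) (max_buffered_packets : Option Int) (max_buffered_bytes : Option Int) (separate_threads : Bool) (out : List String) : Decidable (Spec_create_dumpcap_args_py command child_mode interfaces capture_filter snaplen promiscuous monitor_mode kernel_buffer_size link_layer_type wifi_channel max_packet_count autostop_duration autostop_filesize autostop_files savefile group_access ringbuffer_duration ringbuffer_filesize ringbuffer_files use_pcapng use_libpcap max_buffered_packets max_buffered_bytes separate_threads out) := by unfold Spec_create_dumpcap_args_py; infer_instance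

-- ===== CLAIM =====
def Claim_equal_create_dumpcap_args_py : Prop := ∀ (command : String) (child_mode : Bool) (interfaces : Option (List String)) (capture_filter : Option String) (snaplen : Option Int) (promiscuous : Bool) (monitor_mode : Bool) (kernel_buffer_size : Option Int) (link_layer_type : Option String) (wifi_channel : Option String) (max_packet_count : Option Int) (autostop_duration : Option Int) (autostop_filesize : Option Int) (autostop_files : Option Int) (savefile : Option String) (group_access : Bool) (ringbuffer_duration : Option Int) (ringbuffer_filesize : Option Int) (ringbuffer_files : Option Int) (use_pcapng : Bool) (use_libpcap : Bool) (max_buffered_packets : Option Int) (max_buffered_bytes : Option Int) (separate_threads : Bool), Dom_create_dumpcap_args_py command child_mode interfaces capture_filter snaplen promiscuous monitor_mode kernel_buffer_size link_layer_type wifi_channel max_packet_count autostop_duration autostop_filesize autostop_files savefile group_access ringbuffer_duration ringbuffer_filesize ringbuffer_files use_pcapng use_libpcap max_buffered_packets max_buffered_bytes separate_threads → Pre_create_dumpcap_args_py command child_mode interfaces capture_filter snaplen promiscuous monitor_mode kernel_buffer_size link_layer_type wifi_channel max_packet_count autostop_duration autostop_filesize autostop_files savefile group_access ringbuffer_duration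 ringbuffer_filesize ringbuffer_files use_pcapng use_libpcap max_buffered_packets max_buffered_bytes separate_threads → Spec_create_dumpcap_args_py command child_mode interfaces capture_filter snaplen promiscuous monitor_mode kernel_buffer_size link_layer_type wifi_channel max_packet_count autostop_duration autostop_filesize autostop_files savefile group_access ringbuffer_duration ringbuffer_filesize ringbuffer_files use_pcapng use_libpcap max_buffered_packets max_buffered_bytes separate_threads (create_dumpcap_args_py command child_mode interfaces capture_filter snaplen promiscuous monitor_mode kernel_buffer_size link_layer_type wifi_channel max_packet_count autostop_duration autostop_filesize autostop_files savefile group_access ringbuffer_duration ringbuffer_filesize ringbuffer_files use_pcapng use_libpcap max_buffered_packets max_buffered_bytes separate_threads)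

-- ===== LEMMAS AND PROOFS =====
theorem pvWitness_ok : Dom_create_dumpcap_args_py (pvWitness_create_dumpcap_args_py.1) (pvWitness_create_dumpcap_args_py.2.1) (pvWitness_create_dumpcap_args_py.2.2.1) (pvWitness_create_dumpcap_args_py.2.2.2.1) (pvWitness_create_dumpcap_args_py.2.2.2.2.1) (pvWitness_create_dumpcap_args_py.2.2.2.2.2.1) (pvWitness_create_dumpcap_args_py.2.2.2.2.2.2.1) (pvWitness_create_dumpcap_args_py.2.2.2.2.2.2.2.1) (pvWitness_create_dumpcap_args_py.2.2.2.2.2.2.2.2.1) (pvWitness_create_dumpcap_args_py.2.2.2.2.2.2.2.2.2.1) (pvWitness_create_dumpcap_args_py.2.2.2.2.2.2.2.2.2.2.1) (pvWitness_create_dumpcap_args_py.2.2.2.2.2.2.2.2.2.2.2.1) (pvWitness_create_dumpcap_args_py.2.2.2.2.2.2.2.2.2.2.2.2.1) (pvWitness_create_dumpcap_args_py.2.2.2.2.2.2.2.2.2.2.2.2.2.1) (pvWitness_create_dumpcap_args_py.2.2.2.2.2.2.2.2.2.2.2.2.2.2.1) (pvWitness_create_dumpcap_args_py.2.2.2.2.2.2.2.2.2.2.2.2.2.2.2.1)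 (pvWitness_create_dumpcap_args_py.2.2.2.2.2.2.2.2.2.2.2.2.2.2.2.2.1) (pvWitness_create_dumpcap_args_py.2.2.2.2.2.2.2.2.2.2.2.2.2.2.2.2.2.1) (pvWitness_create_dumpcap_args_py.2.2.2.2.2.2.2.2.2.2.2.2.2.2.2.2.2.2.1) (pvWitness_create_dumpcap_args_py.2.2.2.2.2.2.2.2.2.2.2.2.2.2.2.2.2.2.2.1) (pvWitness_create_dumpcap_args_py.2.2.2.2.2.2.2.2.2.2.2.2.2.2.2.2.2.2.2.2.1) (pvWitness_create_dumpcap_args_py.2.2.2.2.2.2.2.2.2.2.2.2.2.2.2.2.2.2.2.2.2.1) (pvWitness_create_dumpcap_args_py.2.2.2.2.2.2.2.2.2.2.2.2.2.2.2.2.2.2.2.2.2.2.1) (pvWitness_create_dumpcap_args_py.2.2.2.2.2.2.2.2.2.2.2.2.2.2.2.2.2.2.2.2.2.2.2) ∧ Pre_create_dumpcap_args_py (pvWitness_create_dumpcap_args_py.1) (pvWitness_create_dumpcap_args_py.2.1) (pvWitness_create_dumpcap_args_py.2.2.1) (pvWitness_create_dumpcap_args_py.2.2.2.1) (pvWitness_create_dumpcap_args_py.2.2.2.2.1)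 (pvWitness_create_dumpcap_args_py.2.2.2.2.2.1) (pvWitness_create_dumpcap_args_py.2.2.2.2.2.2.1) (pvWitness_create_dumpcap_args_py.2.2.2.2.2.2.2.1) (pvWitness_create_dumpcap_args_py.2.2.2.2.2.2.2.2.1) (pvWitness_create_dumpcap_args_py.2.2.2.2.2.2.2.2.2.1) (pvWitness_create_dumpcap_args_py.2.2.2.2.2.2.2.2.2.2.1) (pvWitness_create_dumpcap_args_py.2.2.2.2.2.2.2.2.2.2.2.1) (pvWitness_create_dumpcap_args_py.2.2.2.2.2.2.2.2.2.2.2.2.1) (pvWitness_create_dumpcap_args_py.2.2.2.2.2.2.2.2.2.2.2.2.2.1) (pvWitness_create_dumpcap_args_py.2.2.2.2.2.2.2.2.2.2.2.2.2.2.1) (pvWitness_create_dumpcap_args_py.2.2.2.2.2.2.2.2.2.2.2.2.2.2.2.1) (pvWitness_create_dumpcap_args_py.2.2.2.2.2.2.2.2.2.2.2.2.2.2.2.2.1) (pvWitness_create_dumpcap_args_py.2.2.2.2.2.2.2.2.2.2.2.2.2.2.2.2.2.1) (pvWitness_create_dumpcap_args_py.2.2.2.2.2.2.2.2.2.2.2.2.2.2.2.2.2.2.1)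 (pvWitness_create_dumpcap_args_py.2.2.2.2.2.2.2.2.2.2.2.2.2.2.2.2.2.2.2.1) (pvWitness_create_dumpcap_args_py.2.2.2.2.2.2.2.2.2.2.2.2.2.2.2.2.2.2.2.2.1) (pvWitness_create_dumpcap_args_py.2.2.2.2.2.2.2.2.2.2.2.2.2.2.2.2.2.2.2.2.2.1) (pvWitness_create_dumpcap_args_py.2.2.2.2.2.2.2.2.2.2.2.2.2.2.2.2.2.2.2.2.2.2.1) (pvWitness_create_dumpcap_args_py.2.2.2.2.2.2.2.2.2.2.2.2.2.2.2.2.2.2.2.2.2.2.2) := by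
  constructor <;> decide

-- ===== VERDICT =====
theorem create_dumpcap_args_py_spec : Claim_equal_create_dumpcap_args_py := by
  intro command child_mode interfaces capture_filter snaplen promiscuous monitor_mode kernel_buffer_size link_layer_type wifi_channel max_packet_count autostop_duration autostop_filesize autostop_files savefile group_access ringbuffer_duration ringbuffer_filesize ringbuffer_files use_pcapng use_libpcap max_buffered_packets max_buffered_bytes separate_threads _hdom hpre
  unfold Spec_create_dumpcap_args_py
  rcases hpre with h | h | h | h <;> subst h <;> rfl
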